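-- pv_equiv track=rewrite | github.com/Sg182/Scientific_programming | Monte_carlo.py | electron_configuration
-- ===== SOURCE A (Python) =====
-- def generate_orbitals(max_n):
--     orbitals = []
--     for n in range(1, max_n + 1):
--         for l in range(n):
--             orbitals.append((n, l))
--     return sorted(orbitals, key=lambda x: (x[0] + x[1], x[0]))
--
-- def max_electrons(l):
--     return 2 * (2 * l + 1)
--
-- def orbital_label(n, l):
--     labels = ['s', 'p', 'd', 'f', 'g', 'h', 'i']  # Extend if needed
--     return f"{n}{labels[l]}"
--
-- def electron_configuration(Z):
--     orbitals = generate_orbitals(7)  # 7 should be sufficient for elements up to 104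
--     configuration = []
--     remaining_electrons = Z
--
--     for n, l in orbitals:
--         electrons_in_orbital = min(remaining_electrons, max_electrons(l))
--         if electrons_in_orbital > 0:
--             configuration.append((orbital_label(n, l), electrons_in_orbital))
--             remaining_electrons -= electrons_in_orbital
--         if remaining_electrons <= 0:
--             break
--
--     return configuration
-- ===== SOURCE B (Python) =====
-- def electron_configuration(Z):
--     # Enumerate orbitals directly in Madelung order by diagonals s = n + l:
--     # for each s, n runs over s//2+1 .. min(s, 7) (so that 0 <= l = s-n < n <= 7).
--     # No orbital list is built and nothing is sorted; each occupancy is derived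
--     # from the running cumulative capacity, with no break and no remaining counter.
--     labels = ['s', 'p', 'd', 'f', 'g', 'h', 'i']
--     config = []
--     cum = 0
--     for s in range(1, 14):
--         for n in range(s // 2 + 1, min(s, 7) + 1):
--             cap = 4 * (s - n) + 2
--             e = min(Z, cum + cap) - cum
--             if e > 0:
--                 config.append((f"{n}{labels[s - n]}", e))
--             cum += cap
--     return config
-- ===== Notes on version B (the rewrite author's own statement) =====
-- stated objective: alternative
-- what changed: B never builds or sorts the orbital list: it enumerates (n, l) directly in Madelung order via the diagonals s = n+l (closed-form bounds n in s//2+1..min(s,7)), and replaces A's mutable remaining-electrons counter and early break by occupancies derived from the running cumulative capacity.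
import Mathlib
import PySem

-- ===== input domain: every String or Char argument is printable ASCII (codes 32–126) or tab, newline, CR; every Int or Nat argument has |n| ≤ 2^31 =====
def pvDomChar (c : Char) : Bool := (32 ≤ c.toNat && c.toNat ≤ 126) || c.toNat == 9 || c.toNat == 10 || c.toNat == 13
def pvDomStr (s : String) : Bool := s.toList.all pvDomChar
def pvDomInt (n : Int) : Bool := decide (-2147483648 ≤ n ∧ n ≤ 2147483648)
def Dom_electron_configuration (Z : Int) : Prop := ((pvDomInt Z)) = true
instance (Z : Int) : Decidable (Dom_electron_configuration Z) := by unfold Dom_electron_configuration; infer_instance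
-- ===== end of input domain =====

-- B enumerates orbitals directly in Madelung order by diagonals s = n+l (no list built,
-- nothing sorted) and derives occupancies from the running cumulative capacity (no
-- remaining counter, no break). Objective: alternative.

-- ===== PORT A =====
def generate_orbitals (max_n : Int) : List (Int × Int) :=
  PySem.List.sorted2
    ((PySem.List.pyRange 1 (max_n + 1) 1).foldl (fun acc n =>
      (PySem.List.pyRange 0 n 1).foldl (fun acc l => acc ++ [(n, l)]) acc) [])
    (fun x => x.1 + x.2) (fun x => x.1) false

def max_electrons (l : Int) : Int := 2 * (2 * l + 1)

-- labels[l]: l is always 0..6 at every call site here, so pyGet? returns some; getD "" is unreachable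
def orbital_label (n l : Int) : String :=
  PySem.Int.toStr n ++ (PySem.List.pyGet? ["s", "p", "d", "f", "g", "h", "i"] l).getD ""

-- A's for-loop with break, as structural recursion over the orbital list with the remaining counter
def ecLoopA (orbs : List (Int × Int)) (rem : Int) : List (String × Int) :=
  match orbs with
  | [] => []
  | (n, l) :: rest =>
    let e := min rem (max_electrons l)
    if e > 0 then
      if rem - e ≤ 0 then [(orbital_label n l, e)]
      else (orbital_label n l, e) :: ecLoopA rest (rem - e)
    else
      if rem ≤ 0 then [] else ecLoopA rest rem

def electron_configuration (Z : Int) : List (String × Int) :=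
  ecLoopA (generate_orbitals 7) Z

-- ===== PORT B =====
-- nested 'for s in range(1,14): for n in range(s//2+1, min(s,7)+1)' with state (config, cum)
def electron_configuration_alt (Z : Int) : List (String × Int) :=
  ((PySem.List.pyRange 1 14 1).foldl (fun (st : List (String × Int) × Int) s =>
    (PySem.List.pyRange (PySem.Int.floordiv s 2 + 1) (min s 7 + 1) 1).foldl
      (fun (st : List (String × Int) × Int) n =>
        let cap := 4 * (s - n) + 2
        let e := min Z (st.2 + cap) - st.2
        (if e > 0 then
           st.1 ++ [(PySem.Int.toStr n ++
                     (PySem.List.pyGet? ["s", "p", "d", "f", "g", "h", "i"] (s - n)).getD "", e)]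
         else st.1,
         st.2 + cap)) st) ([], 0)).1

-- ===== PRECONDITION & SPEC =====
def Spec_electron_configuration (Z : Int) (out : List (String × Int)) : Prop := out = electron_configuration_alt Z
instance (Z : Int) (out : List (String × Int)) : Decidable (Spec_electron_configuration Z out) := by unfold Spec_electron_configuration; infer_instance

-- ===== CLAIM (what is proved, stated in full; the proofs are below) =====
def Claim_equal_electron_configuration : Prop := ∀ (Z : Int), Dom_electron_configuration Z → Spec_electron_configuration Z (electron_configuration Z)

-- ===== LEMMAS AND PROOFS =====

-- B's per-orbital step, on pairs (n, l)
def stepB (Z : Int) (st : List (String × Int) × Int) (p : Int × Int) : List (String × Int) × Int :=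
  let cap := 4 * p.2 + 2
  let e := min Z (st.2 + cap) - st.2
  (if e > 0 then
     st.1 ++ [(PySem.Int.toStr p.1 ++
               (PySem.List.pyGet? ["s", "p", "d", "f", "g", "h", "i"] p.2).getD "", e)]
   else st.1,
   st.2 + cap)

-- the flattened diagonal enumeration as a pair list
def diagOrbitals : List (Int × Int) :=
  (PySem.List.pyRange 1 14 1).flatMap (fun s =>
    (PySem.List.pyRange (PySem.Int.floordiv s 2 + 1) (min s 7 + 1) 1).map (fun n => (n, s - n)))

-- B's loop in recursive form, with the state reduced to rem = Z - cum
def gB (orbs : List (Int × Int)) (rem : Int) : List (String × Int) :=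
  match orbs with
  | [] => []
  | (n, l) :: rest =>
    let cap := 4 * l + 2
    let e := min rem cap
    (if e > 0 then [(orbital_label n l, e)] else []) ++ gB rest (rem - cap)

-- folding the nested loops equals folding stepB over the flattened diagonal list
lemma nested_foldl_eq (Z : Int) (L : List Int) :
    ∀ (st : List (String × Int) × Int),
    L.foldl (fun (st : List (String × Int) × Int) s =>
      (PySem.List.pyRange (PySem.Int.floordiv s 2 + 1) (min s 7 + 1) 1).foldl
        (fun (st : List (String × Int) × Int) n =>
          let cap := 4 * (s - n) + 2
          let e := min Z (st.2 + cap) - st.2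
          (if e > 0 then
             st.1 ++ [(PySem.Int.toStr n ++
                       (PySem.List.pyGet? ["s", "p", "d", "f", "g", "h", "i"] (s - n)).getD "", e)]
           else st.1,
           st.2 + cap)) st) st
    = (L.flatMap (fun s =>
        (PySem.List.pyRange (PySem.Int.floordiv s 2 + 1) (min s 7 + 1) 1).map
          (fun n => (n, s - n)))).foldl (stepB Z) st := by
  induction L with
  | nil => intro st; simp
  | cons s rest ih =>
    intro st
    simp only [List.foldl_cons, List.flatMap_cons, List.foldl_append, List.foldl_map]
    rw [ih]
    rfl

-- B's nested foldl is the foldl of stepB over the flattened diagonal list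
lemma alt_eq_foldl_diag (Z : Int) :
    electron_configuration_alt Z = (diagOrbitals.foldl (stepB Z) ([], 0)).1 := by
  unfold electron_configuration_alt diagOrbitals
  rw [nested_foldl_eq]

-- the foldl of stepB equals acc ++ gB, with rem = Z - cum
lemma foldl_stepB_eq_gB (Z : Int) (orbs : List (Int × Int)) :
    ∀ (acc : List (String × Int)) (cum : Int),
    (orbs.foldl (stepB Z) (acc, cum)).1 = acc ++ gB orbs (Z - cum) := by
  induction orbs with
  | nil => intro acc cum; simp [gB]
  | cons p rest ih =>
    intro acc cum
    obtain ⟨n, l⟩ := p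
    simp only [List.foldl_cons, gB, stepB, orbital_label]
    have hmin : min Z (cum + (4 * l + 2)) - cum = min (Z - cum) (4 * l + 2) := by omega
    have hrem : Z - (cum + (4 * l + 2)) = Z - cum - (4 * l + 2) := by omega
    by_cases h : min (Z - cum) (4 * l + 2) > 0
    · rw [if_pos (by omega : min Z (cum + (4 * l + 2)) - cum > 0)]
      rw [ih, hrem, if_pos h, List.append_assoc]
      simp [hmin]
    · rw [if_neg (by omega : ¬ min Z (cum + (4 * l + 2)) - cum > 0)]
      rw [ih, hrem, if_neg h]
      simp

lemma gB_nonpos (orbs : List (Int × Int))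
    (hcap : ∀ p ∈ orbs, (0 : Int) ≤ p.2) :
    ∀ rem : Int, rem ≤ 0 → gB orbs rem = [] := by
  induction orbs with
  | nil => intro rem _; simp [gB]
  | cons p rest ih =>
    intro rem h
    obtain ⟨n, l⟩ := p
    have hc : (0 : Int) ≤ l := hcap (n, l) (List.mem_cons_self ..)
    simp only [gB]
    rw [if_neg (by omega : ¬ min rem (4 * l + 2) > 0)]
    exact ih (fun q hq => hcap q (List.mem_cons_of_mem _ hq)) _ (by omega)

lemma ecLoopA_eq_gB (orbs : List (Int × Int))
    (hcap : ∀ p ∈ orbs, (0 : Int) ≤ p.2) :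
    ∀ rem : Int, ecLoopA orbs rem = gB orbs rem := by
  induction orbs with
  | nil => intro rem; simp [ecLoopA, gB]
  | cons p rest ih =>
    intro rem
    obtain ⟨n, l⟩ := p
    have hc : (0 : Int) ≤ l := hcap (n, l) (List.mem_cons_self ..)
    have hrest : ∀ p ∈ rest, (0 : Int) ≤ p.2 :=
      fun q hq => hcap q (List.mem_cons_of_mem _ hq)
    simp only [ecLoopA, gB, max_electrons]
    have hcap' : 2 * (2 * l + 1) = 4 * l + 2 := by ring
    rw [hcap']
    by_cases hr : 0 < rem
    · have he : 0 < min rem (4 * l + 2) := by omega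
      rw [if_pos he, if_pos he]
      by_cases hb : rem - min rem (4 * l + 2) ≤ 0
      · rw [if_pos hb, gB_nonpos rest hrest _ (by omega)]
        simp
      · rw [if_neg hb]
        have : rem - min rem (4 * l + 2) = rem - (4 * l + 2) := by omega
        rw [this, ih hrest]
        simp
    · rw [if_neg (by omega : ¬ min rem (4 * l + 2) > 0),
          if_pos (by omega : rem ≤ 0),
          gB_nonpos rest hrest _ (by omega),
          if_neg (by omega : ¬ min rem (4 * l + 2) > 0)]
      simp

-- the 28 orbitals in Madelung order, as a literal (pyRange/sorted2 are evaluated by simp,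
-- never by kernel reduction)
def L28 : List (Int × Int) := [(1, 0), (2, 0), (2, 1), (3, 0), (3, 1), (4, 0), (3, 2), (4, 1), (5, 0), (4, 2), (5, 1), (6, 0), (4, 3), (5, 2), (6, 1), (7, 0), (5, 3), (6, 2), (7, 1), (5, 4), (6, 3), (7, 2), (6, 4), (7, 3), (6, 5), (7, 4), (7, 5), (7, 6)]

lemma gen_eq : generate_orbitals 7 = L28 := by
  have h : ((PySem.List.pyRange 1 (7 + 1) 1).foldl (fun acc n =>
      (PySem.List.pyRange 0 n 1).foldl (fun acc l => acc ++ [(n, l)]) acc) ([] : List (Int × Int)))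
      = [(1, 0), (2, 0), (2, 1), (3, 0), (3, 1), (3, 2), (4, 0), (4, 1), (4, 2), (4, 3), (5, 0), (5, 1), (5, 2), (5, 3), (5, 4), (6, 0), (6, 1), (6, 2), (6, 3), (6, 4), (6, 5), (7, 0), (7, 1), (7, 2), (7, 3), (7, 4), (7, 5), (7, 6)] := by
    simp [PySem.List.pyRange_one_cons]
  unfold generate_orbitals
  rw [h]
  decide

lemma diag_eq : diagOrbitals = L28 := by
  unfold diagOrbitals
  norm_num [PySem.List.pyRange_one_cons, PySem.Int.floordiv_eq_ediv_of_pos, min_def, L28]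

lemma orbitals_eq : generate_orbitals 7 = diagOrbitals := gen_eq.trans diag_eq.symm

lemma ls_nonneg : ∀ p ∈ generate_orbitals 7, (0 : Int) ≤ p.2 := by rw [gen_eq]; decide

-- ===== VERDICT (by name: the statement is the Claim_ definition above) =====
theorem electron_configuration_spec : Claim_equal_electron_configuration := by
  intro Z _
  show electron_configuration Z = electron_configuration_alt Z
  unfold electron_configuration
  rw [alt_eq_foldl_diag, foldl_stepB_eq_gB, ← orbitals_eq, ecLoopA_eq_gB _ ls_nonneg]
  simp
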